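-- pv_equiv track=rewrite | github.com/kiantest1024/functionalAIcases | functional_ai/strict_ai_generator.py | _comma_followed_by_json_field_separator
-- ===== SOURCE A (Python) =====
-- def _comma_followed_by_json_field_separator(s: str, comma_idx: int) -> bool:
--     """
--     判断逗号是否为 JSON 对象里「字段之间」的分隔（后是 \"key\":）。
--     用于区分英文标点，例如 Upon clicking \"PLAY\", the game 里的逗号不是 JSON 分隔符。
--     """
--     j = comma_idx + 1
--     n = len(s)
--     while j < n and s[j].isspace():
--         j += 1
--     if j >= n:
--         return True
--     if s[j] != '"':
--         return False
--     j += 1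
--     escape_next = False
--     while j < n:
--         c = s[j]
--         if escape_next:
--             escape_next = False
--             j += 1
--             continue
--         if c == "\\":
--             escape_next = True
--             j += 1
--             continue
--         if c == '"':
--             j += 1
--             break
--         j += 1
--     else:
--         return False
--     while j < n and s[j].isspace():
--         j += 1
--     return j < n and s[j] == ":"
-- ===== SOURCE B (Python) =====
-- def _comma_followed_by_json_field_separator(s: str, comma_idx: int) -> bool:
--     # Quote-hopping: jump between '"' occurrences with str.find and decide each by the
--     # parity of the backslash run before it, instead of a char-by-char escape state machine.
--     tail = s[comma_idx + 1:].lstrip()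
--     if not tail:
--         return True
--     if tail[0] != '"':
--         return False
--     k = tail.find('"', 1)
--     while k != -1:
--         if (k - len(tail[:k].rstrip('\\'))) % 2 == 0:
--             return tail[k + 1:].lstrip().startswith(':')
--         k = tail.find('"', k + 1)
--     return False
-- ===== Notes on version B (the rewrite author's own statement) =====
-- stated objective: alternative
-- what changed: Replaces A's character-by-character escape-flag state machine by quote-hopping: slice off and lstrip the tail, then jump from one '"' occurrence to the next with str.find and accept the first whose preceding backslash run (len(tail[:k]) - len(tail[:k].rstrip('\\'))) has even length, finally startswith(':').
-- outside the precondition, e.g. on _comma_followed_by_json_field_separator('" :', -4): A returns True, B returns False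
import Mathlib
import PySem

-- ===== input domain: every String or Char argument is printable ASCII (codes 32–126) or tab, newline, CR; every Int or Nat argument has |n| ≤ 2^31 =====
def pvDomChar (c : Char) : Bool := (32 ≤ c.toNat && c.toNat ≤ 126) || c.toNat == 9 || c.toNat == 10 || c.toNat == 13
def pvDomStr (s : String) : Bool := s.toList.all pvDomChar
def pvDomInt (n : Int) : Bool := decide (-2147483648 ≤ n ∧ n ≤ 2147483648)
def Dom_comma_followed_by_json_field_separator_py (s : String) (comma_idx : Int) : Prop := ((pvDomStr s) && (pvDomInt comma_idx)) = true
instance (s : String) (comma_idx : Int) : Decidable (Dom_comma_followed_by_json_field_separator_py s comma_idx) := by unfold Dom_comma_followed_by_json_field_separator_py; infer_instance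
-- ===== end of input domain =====

-- B replaces A's char-by-char escape-flag state machine by quote-hopping: str.find jumps from
-- one '"' to the next and each candidate is judged by the parity of the backslash run before it;
-- alternative decomposition, same O(n) cost.


-- ===== PORT A =====
-- `while j < n and s[j].isspace(): j += 1` — fuel-driven; fuel (n - j).toNat suffices whenever j ≤ n.
-- The `none` branch of pyGet? is Python's IndexError (only reachable outside Pre_).
def pvA_skipWS (cs : List Char) (n j : Int) (fuel : Nat) : Int :=
  match fuel with
  | 0 => j
  | fuel + 1 =>
    if j < n then
      match PySem.List.pyGet? cs j with
      | some c => if PySem.Chars.isspace c then pvA_skipWS cs n (j + 1) fuel else j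
      | none => j
    else j

-- the `while j < n: …` quote scan with the escape_next flag; `some j'` = the `break` with the
-- index after the closing quote, `none` = the loop's `else:` (ran off the end).
def pvA_scan (cs : List Char) (n j : Int) (esc : Bool) (fuel : Nat) : Option Int :=
  match fuel with
  | 0 => none
  | fuel + 1 =>
    if j < n then
      match PySem.List.pyGet? cs j with
      | some c =>
        if esc then pvA_scan cs n (j + 1) false fuel
        else if c = '\\' then pvA_scan cs n (j + 1) true fuel
        else if c = '"' then some (j + 1)
        else pvA_scan cs n (j + 1) esc fuel
      | none => none
    else none

def comma_followed_by_json_field_separator_py (s : String) (comma_idx : Int) : Bool :=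
  let cs := s.toList
  let n : Int := cs.length
  let j0 := comma_idx + 1
  let j1 := pvA_skipWS cs n j0 (n - j0).toNat
  if n ≤ j1 then true
  else if PySem.List.pyGet? cs j1 ≠ some '"' then false
  else
    match pvA_scan cs n (j1 + 1) false (n - (j1 + 1)).toNat with
    | none => false
    | some j2 =>
      let j3 := pvA_skipWS cs n j2 (n - j2).toNat
      decide (j3 < n ∧ PySem.List.pyGet? cs j3 = some ':')

-- ===== PORT B =====
-- `tail.find('"', k)` for 0 ≤ k ≤ len(tail): index of the first '"' at position ≥ k
-- (ported as findIdx? on the suffix; exact for a single-char needle in this range, with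
-- `none` playing the role of Python's -1).
def pvB_findQ (tail : List Char) (k : Nat) : Option Nat :=
  ((tail.drop k).findIdx? (· == '"')).map (k + ·)

-- `k - len(tail[:k].rstrip('\\'))` = length of the backslash run ending just before index k;
-- hand-ported (PySem has no rstrip-with-chars): exact, both count the trailing '\\' of tail[:k].
def pvB_runLen (tail : List Char) (k : Nat) : Nat :=
  ((tail.take k).reverse.takeWhile (· == '\\')).length

-- the `while k != -1:` quote-hopping loop; fuel tail.length suffices since k only grows
def pvB_loop (tail : List Char) (k : Nat) (fuel : Nat) : Bool :=
  match fuel with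
  | 0 => false
  | fuel + 1 =>
    match pvB_findQ tail k with
    | none => false
    | some k' =>
      if pvB_runLen tail k' % 2 = 0 then
        PySem.Chars.startswith (PySem.Chars.lstrip (tail.drop (k' + 1))) [':']
      else pvB_loop tail (k' + 1) fuel

def comma_followed_by_json_field_separator_py_alt (s : String) (comma_idx : Int) : Bool :=
  let tail := PySem.Chars.lstrip (PySem.List.slice s.toList (some (comma_idx + 1)) none)
  match tail with
  | [] => true
  | c :: r =>
    if c ≠ '"' then false
    else pvB_loop (c :: r) 1 (c :: r).length

-- ===== PRECONDITION & SPEC =====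
-- Pre_ excludes comma_idx ≤ -2 (a comma index is in fact non-negative): there A either raises
-- IndexError (comma_idx + 1 < -len(s)) or scans via Python's negative-index wraparound of s[j]
-- — an accident of its indexing that B's slice-based tail does not reproduce.
def Pre_comma_followed_by_json_field_separator_py (_s : String) (comma_idx : Int) : Prop :=
  -1 ≤ comma_idx
instance (s : String) (comma_idx : Int) : Decidable (Pre_comma_followed_by_json_field_separator_py s comma_idx) := by unfold Pre_comma_followed_by_json_field_separator_py; infer_instance

def pvWitness_comma_followed_by_json_field_separator_py : String × Int := ("a,\"k\": 1", 1)

def Spec_comma_followed_by_json_field_separator_py (s : String) (comma_idx : Int) (out : Bool) : Prop := out = comma_followed_by_json_field_separator_py_alt s comma_idx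
instance (s : String) (comma_idx : Int) (out : Bool) : Decidable (Spec_comma_followed_by_json_field_separator_py s comma_idx out) := by unfold Spec_comma_followed_by_json_field_separator_py; infer_instance

-- ===== CLAIM (what is proved, stated in full; the proofs are below) =====
def Claim_equal_comma_followed_by_json_field_separator_py : Prop := ∀ (s : String) (comma_idx : Int), Dom_comma_followed_by_json_field_separator_py s comma_idx → Pre_comma_followed_by_json_field_separator_py s comma_idx → Spec_comma_followed_by_json_field_separator_py s comma_idx (comma_followed_by_json_field_separator_py s comma_idx)

-- ===== LEMMAS AND PROOFS =====

-- proof-side structural matcher for A's quote scan (escape-flag semantics on a list):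
-- `some rem` = suffix after the closing quote, `none` = no unescaped quote
def pvM_body : List Char → Option (List Char)
  | [] => none
  | c :: rest =>
    if c = '"' then some rest
    else if c = '\\' then
      match rest with
      | [] => none
      | _ :: rest' => pvM_body rest'
    else pvM_body rest

-- trailing backslash-run length (pvB_runLen tail k = pvR (tail.take k) definitionally)
def pvR (l : List Char) : Nat := (l.reverse.takeWhile (· == '\\')).length

-- a suffix of cs sits at index length cs - length u
lemma pv_drop_of_suffix (cs u : List Char) (h : u <:+ cs) :
    cs.drop (cs.length - u.length) = u := by
  obtain ⟨t, rfl⟩ := h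
  simp

lemma pvM_body_suffix : ∀ u rem : List Char, pvM_body u = some rem → rem <:+ u := by
  intro u
  induction u using pvM_body.induct with
  | case1 => intro rem h; rw [pvM_body.eq_def] at h; simp at h
  | case2 rest =>
      intro rem h
      rw [pvM_body.eq_def] at h
      simp at h
      exact h ▸ List.suffix_cons '"' rest
  | case3 _ =>
      intro rem h
      rw [pvM_body.eq_def] at h
      simp at h
  | case4 head rest' _ ih =>
      intro rem h
      rw [pvM_body.eq_def] at h
      simp at h
      exact ((ih rem h).trans (List.suffix_cons head rest')).trans (List.suffix_cons '\\' _)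
  | case5 head rest' hq hb ih =>
      intro rem h
      rw [pvM_body.eq_def] at h
      simp [hq, hb] at h
      exact (ih rem h).trans (List.suffix_cons head rest')

-- the whitespace loop computes: final index = n - length of (dropWhile isspace) of the suffix at j
lemma pvA_skipWS_eq (cs : List Char) :
    ∀ (fuel : Nat) (j : Int), 0 ≤ j → j ≤ (cs.length : Int) →
      ((cs.length : Int) - j).toNat ≤ fuel →
      pvA_skipWS cs cs.length j fuel =
        (cs.length : Int) - ((cs.drop j.toNat).dropWhile PySem.Chars.isspace).length := by
  intro fuel
  induction fuel with
  | zero =>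
      intro j h0 hle hf
      have hj : j = (cs.length : Int) := by omega
      subst hj
      simp [pvA_skipWS]
  | succ fuel ih =>
      intro j h0 hle hf
      by_cases hlt : j < (cs.length : Int)
      · have hjn : j.toNat < cs.length := by omega
        have hget : PySem.List.pyGet? cs j = some cs[j.toNat] :=
          PySem.List.pyGet?_eq_some_getElem cs h0 hlt
        have hdrop : cs.drop j.toNat = cs[j.toNat] :: cs.drop (j.toNat + 1) :=
          (List.getElem_cons_drop hjn).symm
        have hstep : pvA_skipWS cs (cs.length : Int) j (fuel + 1)
            = if PySem.Chars.isspace cs[j.toNat] then pvA_skipWS cs (cs.length : Int) (j + 1) fuel else j := by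
          simp only [pvA_skipWS, if_pos hlt, hget]
        rw [hstep]
        by_cases hsp : PySem.Chars.isspace cs[j.toNat]
        · have h1 : (j + 1).toNat = j.toNat + 1 := by omega
          have hih := ih (j + 1) (by omega) (by omega) (by omega)
          rw [h1] at hih
          rw [if_pos hsp, hih, hdrop, List.dropWhile_cons_of_pos hsp]
        · rw [if_neg hsp, hdrop, List.dropWhile_cons_of_neg hsp]
          have hlen : (cs.drop (j.toNat + 1)).length = cs.length - (j.toNat + 1) := by
            simp
          simp only [List.length_cons, hlen]
          omega
      · have hj : j = (cs.length : Int) := by omega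
        subst hj
        simp [pvA_skipWS]

-- the quote scan agrees with the structural matcher on the suffix at j
lemma pvA_scan_eq (cs : List Char) :
    ∀ (fuel : Nat) (j : Int), 0 ≤ j → j ≤ (cs.length : Int) →
      ((cs.length : Int) - j).toNat ≤ fuel →
      pvA_scan cs cs.length j false fuel =
        (pvM_body (cs.drop j.toNat)).map (fun rem => (cs.length : Int) - rem.length) := by
  intro fuel
  induction fuel using Nat.strong_induction_on with
  | _ fuel ih =>
    intro j h0 hle hf
    by_cases hlt : j < (cs.length : Int)
    · have hjn : j.toNat < cs.length := by omega
      have hget : PySem.List.pyGet? cs j = some cs[j.toNat] :=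
        PySem.List.pyGet?_eq_some_getElem cs h0 hlt
      have hdrop : cs.drop j.toNat = cs[j.toNat] :: cs.drop (j.toNat + 1) :=
        (List.getElem_cons_drop hjn).symm
      obtain ⟨fuel', rfl⟩ : ∃ f, fuel = f + 1 := ⟨fuel - 1, by omega⟩
      by_cases hq : cs[j.toNat] = '"'
      · simp only [pvA_scan, hlt, if_pos, hget, Bool.false_eq_true, if_false, hq,
          if_neg (by decide : ¬ ('"' : Char) = '\\')]
        rw [hdrop, hq]
        rw [show pvM_body ('"' :: cs.drop (j.toNat + 1)) = some (cs.drop (j.toNat + 1)) from by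
          rw [pvM_body.eq_def]; simp]
        simp only [Option.map_some]
        have : (cs.drop (j.toNat + 1)).length = cs.length - (j.toNat + 1) := by simp
        rw [this]
        congr 1
        omega
      · by_cases hb : cs[j.toNat] = '\\'
        · -- escape: consume two characters (or fail at the very end)
          simp only [pvA_scan, hlt, if_pos, hget, Bool.false_eq_true, if_false, hb, if_pos]
          rw [hdrop, hb]
          by_cases hlt2 : j + 1 < (cs.length : Int)
          · have hjn2 : j.toNat + 1 < cs.length := by omega
            have h1 : (j + 1).toNat = j.toNat + 1 := by omega
            have hget2 : PySem.List.pyGet? cs (j + 1) = some (cs[j.toNat + 1]'hjn2) := by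
              rw [PySem.List.pyGet?_of_nonneg cs (by omega), h1, List.getElem?_eq_getElem hjn2]
            have hdrop2 : cs.drop (j.toNat + 1) = (cs[j.toNat + 1]'hjn2) :: cs.drop (j.toNat + 2) := by
              exact (List.getElem_cons_drop hjn2).symm
            obtain ⟨fuel'', rfl⟩ : ∃ f, fuel' = f + 1 := ⟨fuel' - 1, by omega⟩
            simp only [pvA_scan, hlt2, if_pos, hget2]
            have h2 : (j + 1 + 1).toNat = j.toNat + 2 := by omega
            have := ih fuel'' (by omega) (j + 2) (by omega) (by omega) (by omega)
            have h3 : (j + 1 + 1) = j + 2 := by ring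
            rw [h3, this, hdrop2]
            have h4 : (j + 2).toNat = j.toNat + 2 := by omega
            rw [h4]
            rw [show pvM_body ('\\' :: (cs[j.toNat + 1]'hjn2) :: cs.drop (j.toNat + 2)) = pvM_body (cs.drop (j.toNat + 2)) from by
              rw [pvM_body.eq_def]; simp]
          · -- backslash is the last character: loop exhausts, matcher fails
            have hj1 : j + 1 = (cs.length : Int) := by omega
            have hnil : cs.drop (j.toNat + 1) = [] :=
              List.drop_eq_nil_of_le (by omega)
            rw [hnil]
            rw [show pvM_body ['\\'] = none from by rw [pvM_body.eq_def]; simp]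
            simp only [Option.map_none]
            cases fuel' with
            | zero => simp [pvA_scan]
            | succ f => simp [pvA_scan, hj1]
        · -- ordinary character
          simp only [pvA_scan, hlt, if_pos, hget, Bool.false_eq_true, if_false, hq, hb]
          have h1 : (j + 1).toNat = j.toNat + 1 := by omega
          have := ih fuel' (by omega) (j + 1) (by omega) (by omega) (by omega)
          rw [h1] at this
          rw [this, hdrop]
          rw [show pvM_body (cs[j.toNat] :: cs.drop (j.toNat + 1)) = pvM_body (cs.drop (j.toNat + 1)) from by
            rw [pvM_body.eq_def]; simp [hq, hb]]
    · have hj : j = (cs.length : Int) := by omega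
      have hnil : cs.drop j.toNat = [] := List.drop_eq_nil_of_le (by omega)
      rw [hnil]
      rw [show pvM_body [] = none from by rw [pvM_body.eq_def]]
      cases fuel with
      | zero => simp [pvA_scan]
      | succ f => simp [pvA_scan, hj]

lemma pv_suffix_drop_all (cs : List Char) (u : List Char) (h : u <:+ cs) :
    cs.drop ((cs.length : Int) - (u.length : Int)).toNat = u := by
  have hlen : u.length ≤ cs.length := h.length_le
  have : ((cs.length : Int) - (u.length : Int)).toNat = cs.length - u.length := by omega
  rw [this]
  exact pv_drop_of_suffix cs u h

-- ===== the B-side bridge: quote-hopping with parity = the structural matcher =====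

-- appending after a list ending in '"' does not change the trailing backslash run
lemma pvR_append_quote (a w : List Char) (ha : a.getLast? = some '"') :
    pvR (a ++ w) = pvR w := by
  unfold pvR
  rw [List.reverse_append, List.takeWhile_append]
  split_ifs with h
  · have hfull : w.reverse.takeWhile (· == '\\') = w.reverse :=
      (List.takeWhile_prefix _).eq_of_length h
    have hhead : a.reverse.head? = some '"' := by rw [List.head?_reverse]; exact ha
    cases hrev : a.reverse with
    | nil => rw [hrev] at hhead; simp at hhead
    | cons x t =>
        rw [hrev] at hhead
        have hx : x = '"' := by simpa using hhead
        subst hx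
        rw [show (('"' :: t).takeWhile (· == '\\')) = [] from by simp]
        simp [hfull]
  · rfl

lemma pvR_cons_ne (c : Char) (w : List Char) (hc : (c == '\\') = false) :
    pvR (c :: w) = pvR w := by
  unfold pvR
  rw [show (c :: w).reverse = w.reverse ++ [c] from by simp, List.takeWhile_append]
  split_ifs with h
  · rw [show ([c].takeWhile (· == '\\')) = [] from by simp [hc]]
    simp [h]
  · rfl

lemma pvR_cons2_parity (d : Char) (w : List Char) :
    pvR ('\\' :: d :: w) % 2 = pvR w % 2 := by
  unfold pvR
  rw [show ('\\' :: d :: w).reverse = w.reverse ++ [d, '\\'] from by simp, List.takeWhile_append]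
  split_ifs with h
  · by_cases hd : d = '\\'
    · subst hd
      rw [show (['\\', '\\'].takeWhile (· == '\\')) = ['\\', '\\'] from by decide]
      simp only [List.length_append, h, List.length_cons, List.length_nil]
      omega
    · rw [show ([d, '\\'].takeWhile (· == '\\')) = [] from by
        simp [hd]]
      simp [h]
  · rfl

-- the matcher across a quote-free segment: only the parity of its trailing backslash run matters
lemma pv_esc_seg : ∀ (N : Nat) (w z : List Char), w.length ≤ N →
    (∀ c ∈ w, (c == '"') = false) →
    pvM_body (w ++ z) =
      if pvR w % 2 = 1 then
        (match z with | [] => none | _ :: z' => pvM_body z')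
      else pvM_body z := by
  intro N
  induction N with
  | zero =>
      intro w z hlen hw
      have hnil : w = [] := List.eq_nil_of_length_eq_zero (by omega)
      subst hnil
      simp [pvR]
  | succ N ih =>
      intro w z hlen hw
      cases w with
      | nil => simp [pvR]
      | cons c w' =>
          have hcq : ¬ c = '"' := by
            have := hw c (List.mem_cons_self)
            simpa using this
          by_cases hcb : c = '\\'
          · subst hcb
            cases w' with
            | nil =>
                rw [List.cons_append, List.nil_append]
                rw [if_pos (by decide : pvR ['\\'] % 2 = 1)]
                cases z with
                | nil => simp [pvM_body]
                | cons a z' => simp [pvM_body]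
            | cons d w'' =>
                have hw'' : ∀ x ∈ w'', (x == '"') = false := by
                  intro x hx; exact hw x (by simp [hx])
                rw [List.cons_append, List.cons_append]
                rw [show pvM_body ('\\' :: d :: (w'' ++ z)) = pvM_body (w'' ++ z) from by
                  rw [pvM_body.eq_def]; simp]
                rw [ih w'' z (by simp at hlen; omega) hw'']
                rw [show pvR ('\\' :: d :: w'') % 2 = pvR w'' % 2 from pvR_cons2_parity d w'']
          · have hw' : ∀ x ∈ w', (x == '"') = false := by
              intro x hx; exact hw x (by simp [hx])
            rw [List.cons_append]
            rw [show pvM_body (c :: (w' ++ z)) = pvM_body (w' ++ z) from by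
              rw [pvM_body.eq_def]; simp [hcq, hcb]]
            rw [ih w' z (by simp at hlen; omega) hw']
            rw [pvR_cons_ne c w' (by simpa using hcb)]

-- dropWhile = drop past the takeWhile prefix
lemma pv_dropWhile_eq_drop (p : Char → Bool) : ∀ l : List Char,
    l.dropWhile p = l.drop (l.takeWhile p).length := by
  intro l
  induction l with
  | nil => rfl
  | cons a t ih =>
      by_cases hp : p a
      · rw [List.dropWhile_cons_of_pos hp, List.takeWhile_cons_of_pos hp,
          List.length_cons, List.drop_succ_cons]
        exact ih
      · rw [List.dropWhile_cons_of_neg hp, List.takeWhile_cons_of_neg hp]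
        rfl

-- the head of a dropWhile residue falsifies the predicate
lemma pv_dropWhile_head_false {p : Char → Bool} : ∀ (l : List Char) (x : Char) (rest : List Char),
    l.dropWhile p = x :: rest → p x = false := by
  intro l
  induction l with
  | nil => intro x rest h; simp at h
  | cons a t ih =>
      intro x rest h
      by_cases hp : p a
      · rw [List.dropWhile_cons_of_pos hp] at h
        exact ih x rest h
      · rw [List.dropWhile_cons_of_neg hp] at h
        cases h
        simpa using hp

-- the quote-hopping loop computes the matcher's verdict on the suffix after the opening quote
lemma pv_loop_eq (tail : List Char) : ∀ (fuel k : Nat), 1 ≤ k →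
    tail[k - 1]? = some '"' → tail.length - k < fuel →
    pvB_loop tail k fuel =
      (match pvM_body (tail.drop k) with
       | none => false
       | some rem => PySem.Chars.startswith (PySem.Chars.lstrip rem) [':']) := by
  intro fuel
  induction fuel with
  | zero => intro k hk hq hf; omega
  | succ fuel ih =>
      intro k hk hq hf
      have hk1 : k - 1 < tail.length := (List.getElem?_eq_some_iff.mp hq).1
      have hklen : k ≤ tail.length := by omega
      have hsplit : (tail.drop k).takeWhile (· != '"') ++ (tail.drop k).dropWhile (· != '"')
          = tail.drop k := List.takeWhile_append_dropWhile
      have hwq : ∀ c ∈ (tail.drop k).takeWhile (· != '"'), (c == '"') = false := by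
        intro c hc
        have := List.mem_takeWhile_imp hc
        simpa using this
      have hfindw : ((tail.drop k).takeWhile (· != '"')).findIdx? (· == '"') = none :=
        List.findIdx?_eq_none_iff.mpr hwq
      have hlast : (tail.take k).getLast? = some '"' := by
        rw [List.getLast?_eq_getElem?]
        simp only [List.length_take]
        rw [List.getElem?_take, if_pos (by omega),
          show min k tail.length - 1 = k - 1 from by omega]
        exact hq
      cases hd : (tail.drop k).dropWhile (· != '"') with
      | nil =>
          have hveq : tail.drop k = (tail.drop k).takeWhile (· != '"') := by
            conv_lhs => rw [← hsplit]
            rw [hd, List.append_nil]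
          have hfind : pvB_findQ tail k = none := by
            unfold pvB_findQ
            rw [hveq, hfindw]; rfl
          rw [show pvB_loop tail k (fuel + 1)
              = (match pvB_findQ tail k with
                 | none => false
                 | some k' =>
                   if pvB_runLen tail k' % 2 = 0 then
                     PySem.Chars.startswith (PySem.Chars.lstrip (tail.drop (k' + 1))) [':']
                   else pvB_loop tail (k' + 1) fuel) from rfl, hfind]
          have hbody : pvM_body (tail.drop k) = none := by
            have h1 := pv_esc_seg ((tail.drop k).takeWhile (· != '"')).length
              ((tail.drop k).takeWhile (· != '"')) [] le_rfl hwq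
            rw [List.append_nil] at h1
            rw [hveq, h1]
            split_ifs
            · rfl
            · simp [pvM_body]
          rw [hbody]
      | cons x rest =>
          have hx : x = '"' := by
            have := pv_dropWhile_head_false _ _ _ hd
            simpa using this
          subst hx
          have hfindv : (tail.drop k).findIdx? (· == '"')
              = some ((tail.drop k).takeWhile (· != '"')).length := by
            conv_lhs => rw [← hsplit, hd]
            rw [List.findIdx?_append, hfindw]
            simp [List.findIdx?_cons]
          have hfind : pvB_findQ tail k
              = some (k + ((tail.drop k).takeWhile (· != '"')).length) := by
            unfold pvB_findQ
            rw [hfindv]; rfl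
          have htake : tail.take (k + ((tail.drop k).takeWhile (· != '"')).length)
              = tail.take k ++ (tail.drop k).takeWhile (· != '"') := by
            rw [List.take_add]
            congr 1
            exact (List.prefix_iff_eq_take.mp (List.takeWhile_prefix _)).symm
          have hrun : pvB_runLen tail (k + ((tail.drop k).takeWhile (· != '"')).length)
              = pvR ((tail.drop k).takeWhile (· != '"')) := by
            show pvR (tail.take _) = _
            rw [htake]
            exact pvR_append_quote _ _ hlast
          have hdropk' : tail.drop (k + ((tail.drop k).takeWhile (· != '"')).length)
              = '"' :: rest := by
            rw [← List.drop_drop, ← pv_dropWhile_eq_drop]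
            exact hd
          have hdrop2 : (tail.drop (k + ((tail.drop k).takeWhile (· != '"')).length)).drop 1
              = tail.drop (k + ((tail.drop k).takeWhile (· != '"')).length + 1) := by
            rw [List.drop_drop]
          have hdropk'1 : tail.drop (k + ((tail.drop k).takeWhile (· != '"')).length + 1)
              = rest := by
            rw [← hdrop2, hdropk']
            rfl
          have hbody : pvM_body (tail.drop k) =
              if pvR ((tail.drop k).takeWhile (· != '"')) % 2 = 1 then pvM_body rest
              else some rest := by
            conv_lhs => rw [← hsplit, hd]
            rw [pv_esc_seg _ _ ('"' :: rest) le_rfl hwq]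
            split_ifs with hpar
            · show (match ('"' :: rest : List Char) with
                | [] => none | _ :: z' => pvM_body z') = pvM_body rest
              rfl
            · show pvM_body ('"' :: rest) = some rest
              rw [pvM_body.eq_def]
              simp
          have hlenfact : tail.length
              = k + ((tail.drop k).takeWhile (· != '"')).length + 1 + rest.length := by
            have hcl := congrArg List.length hdropk'
            simp at hcl
            omega
          rw [show pvB_loop tail k (fuel + 1)
              = (match pvB_findQ tail k with
                 | none => false
                 | some k' =>
                   if pvB_runLen tail k' % 2 = 0 then
                     PySem.Chars.startswith (PySem.Chars.lstrip (tail.drop (k' + 1))) [':']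
                   else pvB_loop tail (k' + 1) fuel) from rfl, hfind]
          simp only []
          by_cases hpar : pvR ((tail.drop k).takeWhile (· != '"')) % 2 = 0
          · rw [if_pos (by rw [hrun]; exact hpar), hdropk'1, hbody,
              if_neg (by omega)]
          · rw [if_neg (by rw [hrun]; exact hpar), hbody, if_pos (by omega)]
            have hq' : tail[(k + ((tail.drop k).takeWhile (· != '"')).length + 1) - 1]?
                = some '"' := by
              rw [show (k + ((tail.drop k).takeWhile (· != '"')).length + 1) - 1
                  = k + ((tail.drop k).takeWhile (· != '"')).length from by omega]
              rw [← List.head?_drop, hdropk']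
              rfl
            rw [ih _ (by omega) hq' (by omega)]
            rw [hdropk'1]

-- ===== VERDICT (by name: the statement is the Claim_ definition above) =====
theorem comma_followed_by_json_field_separator_py_spec : Claim_equal_comma_followed_by_json_field_separator_py := by
  intro s comma_idx _hDom hPre
  unfold Spec_comma_followed_by_json_field_separator_py
  unfold comma_followed_by_json_field_separator_py comma_followed_by_json_field_separator_py_alt
  set cs := s.toList with hcs
  have h0 : (0 : Int) ≤ comma_idx + 1 := by
    have := hPre; unfold Pre_comma_followed_by_json_field_separator_py at this; omega
  dsimp only []
  rw [PySem.List.slice_from cs h0]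
  by_cases hbig : (cs.length : Int) ≤ comma_idx + 1
  · -- tail is empty both ways: A's first loop gets 0 fuel and j stays ≥ n
    have hnil : cs.drop (comma_idx + 1).toNat = [] := List.drop_eq_nil_of_le (by omega)
    have hf0 : ((cs.length : Int) - (comma_idx + 1)).toNat = 0 := by omega
    rw [hf0, hnil]
    simp [pvA_skipWS, PySem.Chars.lstrip, hbig]
  · replace hbig : comma_idx + 1 < (cs.length : Int) := by omega
    have hskip := pvA_skipWS_eq cs (((cs.length : Int) - (comma_idx + 1)).toNat)
      (comma_idx + 1) h0 (by omega) (le_refl _)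
    obtain ⟨t1, ht1⟩ : ∃ u, (cs.drop (comma_idx + 1).toNat).dropWhile PySem.Chars.isspace = u := ⟨_, rfl⟩
    rw [show PySem.Chars.lstrip (cs.drop (comma_idx + 1).toNat) = t1 from ht1]
    rw [hskip, ht1]
    have ht1suf : t1 <:+ cs :=
      ht1 ▸ (List.dropWhile_suffix _).trans (List.drop_suffix _ _)
    have ht1len : t1.length ≤ cs.length := ht1suf.length_le
    have ht1drop : cs.drop ((cs.length : Int) - (t1.length : Int)).toNat = t1 :=
      pv_suffix_drop_all cs t1 ht1suf
    clear ht1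
    cases t1 with
    | nil =>
        simp
    | cons c r =>
        have hmatch : (match (c :: r : List Char) with
            | [] => true
            | c :: r => if c ≠ '"' then false else pvB_loop (c :: r) 1 (c :: r).length)
            = if c ≠ '"' then false else pvB_loop (c :: r) 1 (c :: r).length := rfl
        rw [hmatch]
        have hlt1 : (cs.length : Int) - ((c :: r).length : Int) < (cs.length : Int) := by
          simp
        rw [if_neg (by omega)]
        have hget1 : PySem.List.pyGet? cs ((cs.length : Int) - ((c :: r).length : Int)) = some c := by
          rw [PySem.List.pyGet?_of_nonneg cs (by simp only [List.length_cons] at ht1len ⊢; omega)]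
          rw [← List.head?_drop, ht1drop]
          rfl
        by_cases hq : c = '"'
        · subst hq
          rw [if_neg (by simp only [List.length_cons, Nat.cast_add, Nat.cast_one] at hget1; simp [hget1])]
          rw [if_neg (by simp)]
          rw [pv_loop_eq ('"' :: r) ('"' :: r).length 1 (le_refl 1) rfl (by simp)]
          have hdropr : cs.drop (((cs.length : Int) - (('"' :: r).length : Int)) + 1).toNat = r := by
            have h1 : (((cs.length : Int) - (('"' :: r).length : Int)) + 1).toNat
                = ((cs.length : Int) - (('"' :: r).length : Int)).toNat + 1 := by
              simp only [List.length_cons] at ht1len ⊢; omega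
            rw [h1, ← List.drop_drop, ht1drop]
            rfl
          have hscan := pvA_scan_eq cs
            (((cs.length : Int) - (((cs.length : Int) - (('"' :: r).length : Int)) + 1)).toNat)
            (((cs.length : Int) - (('"' :: r).length : Int)) + 1)
            (by simp only [List.length_cons] at ht1len ⊢; omega) (by simp only [List.length_cons] at ht1len ⊢; omega) (le_refl _)
          rw [hscan, hdropr]
          show _ = (match pvM_body (('"' :: r).drop 1) with
            | none => false
            | some rem => PySem.Chars.startswith (PySem.Chars.lstrip rem) [':'])
          rw [show ('"' :: r).drop 1 = r from rfl]
          cases hbody : pvM_body r with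
          | none => simp
          | some rem =>
              simp only [Option.map_some]
              have hremsuf : rem <:+ cs :=
                ((pvM_body_suffix r rem hbody).trans (List.suffix_cons '"' r)).trans ht1suf
              have hremlen : rem.length ≤ cs.length := hremsuf.length_le
              have hremdrop : cs.drop ((cs.length : Int) - (rem.length : Int)).toNat = rem :=
                pv_suffix_drop_all cs rem hremsuf
              have hskip2 := pvA_skipWS_eq cs
                (((cs.length : Int) - ((cs.length : Int) - (rem.length : Int))).toNat)
                ((cs.length : Int) - (rem.length : Int)) (by omega) (by omega) (le_refl _)
              obtain ⟨t3, ht3⟩ : ∃ u, rem.dropWhile PySem.Chars.isspace = u := ⟨_, rfl⟩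
              rw [show PySem.Chars.lstrip rem = t3 from ht3]
              rw [hskip2, hremdrop, ht3]
              have ht3suf : t3 <:+ cs := ht3 ▸ (List.dropWhile_suffix _).trans hremsuf
              have ht3len : t3.length ≤ cs.length := ht3suf.length_le
              have ht3drop : cs.drop ((cs.length : Int) - (t3.length : Int)).toNat = t3 :=
                pv_suffix_drop_all cs t3 ht3suf
              clear ht3
              cases t3 with
              | nil =>
                  rw [decide_eq_false (by simp)]
                  rfl
              | cons d r3 =>
                  have hget3 : PySem.List.pyGet? cs ((cs.length : Int) - ((d :: r3).length : Int)) = some d := by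
                    rw [PySem.List.pyGet?_of_nonneg cs (by simp only [List.length_cons] at ht3len ⊢; omega)]
                    rw [← List.head?_drop, ht3drop]
                    rfl
                  have hlt3 : (cs.length : Int) - ((d :: r3).length : Int) < (cs.length : Int) := by
                    simp
                  by_cases hcolon : d = ':'
                  · subst hcolon
                    rw [decide_eq_true (by simp only [List.length_cons, Nat.cast_add, Nat.cast_one] at hget3 hlt3; exact ⟨hlt3, hget3⟩)]
                    have : PySem.Chars.startswith (':' :: r3) [':'] = true := by
                      rw [PySem.Chars.startswith_iff]
                      exact ⟨r3, rfl⟩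
                    rw [this]
                  · rw [decide_eq_false (by simp only [List.length_cons, Nat.cast_add, Nat.cast_one] at hget3; simp [hget3, hcolon])]
                    have : PySem.Chars.startswith (d :: r3) [':'] = false := by
                      rw [Bool.eq_false_iff]
                      intro hc
                      rw [PySem.Chars.startswith_iff] at hc
                      obtain ⟨t, ht⟩ := hc
                      exact hcolon (by simpa using congrArg (·.head?) ht.symm)
                    rw [this]
        · rw [if_pos (by simp only [List.length_cons, Nat.cast_add, Nat.cast_one] at hget1; simp [hget1, hq])]
          rw [if_pos hq]
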